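-- pv_equiv track=rewrite | github.com/JuanPabloSGU/ITI1120---Introduction-To-Computing | Assingments_ITI1120/Assignment_3/a3_part2.py | weaveop
-- ===== SOURCE A (Python) =====
-- def weaveop(s):
--     '''(str)->(str)
--     Inserts characters between every pair of consecutive characters in phrase.
--     Precondition: String is given
--     Post: A String is returned
--     '''
--
--     ns = ""
--     first = ""
--     second = ""
--
--     if len(s)<=1: #Returns the orginial string when the length of the string is one
--         return s
--
--     for i in range(len(s)-1):
--
--         if s[i].isalpha() and s[i+1].isalpha(): #To check if the character and the next character are characters usful when we check if the next character is a number
--             if s[i].isupper(): #first position check if uppercase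
--                 first = s[i] + 'O'
--             else:
--                 first = s[i] + 'o'
--
--             if s[i+1:i+2].isupper(): #second position check if uppercase
--                 second = 'P' + s[i+1:i+1]
--             else:
--                 second = 'p' + s[i+1:i+1]
--
--             ns += first + second
--         else:
--             ns += s[i] + "" #When the next character is a number
--
--         if i == len(s)-2: # For odd len of numbers
--                 ns = ns + s[len(s)-1]
--
--     return ns
-- ===== SOURCE B (Python) =====
-- def _weave_run(r):
--     # weave markers inside one run (all-alphabetic, or a singleton)
--     parts = [r[0]]
--     prev = r[0]
--     for ch in r[1:]:
--         parts.append(('O' if prev.isupper() else 'o') + ('P' if ch.isupper() else 'p') + ch)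
--         prev = ch
--     return ''.join(parts)
--
--
-- def weaveop(s):
--     # pass 1: segment s into maximal alphabetic runs; every
--     # non-alphabetic character becomes its own singleton run
--     runs = []
--     for ch in s:
--         if ch.isalpha() and runs and runs[-1][-1].isalpha():
--             runs[-1].append(ch)
--         else:
--             runs.append([ch])
--     # pass 2: weave each run independently and concatenate
--     return ''.join(_weave_run(r) for r in runs)
-- ===== Notes on version B (the rewrite author's own statement) =====
-- stated objective: alternative
-- what changed: B segments the string into maximal alphabetic runs (non-alphabetic characters become singleton runs) in one grouping pass and then weaves the case markers inside each run independently, replacing A's single index scan over range(len(s)-1) with its slice re-checks, last-iteration flag and string += accumulation.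
import Mathlib
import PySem

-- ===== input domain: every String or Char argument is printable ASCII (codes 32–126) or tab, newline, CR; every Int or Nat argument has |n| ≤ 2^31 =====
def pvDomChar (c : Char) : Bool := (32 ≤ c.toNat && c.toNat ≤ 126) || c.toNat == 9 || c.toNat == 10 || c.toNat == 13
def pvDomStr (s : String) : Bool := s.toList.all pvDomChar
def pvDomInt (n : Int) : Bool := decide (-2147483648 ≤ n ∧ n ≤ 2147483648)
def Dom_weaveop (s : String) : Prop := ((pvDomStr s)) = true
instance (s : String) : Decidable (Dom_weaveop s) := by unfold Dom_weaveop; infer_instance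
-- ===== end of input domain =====

-- B segments the string into maximal alphabetic runs (non-alphabetic characters as
-- singleton runs) and weaves the markers inside each run independently, instead of
-- A's single index scan over all adjacent positions; objective: alternative.

-- ===== PORT A =====
-- hand port of Python str.isupper, exact on ASCII (cased ASCII chars are exactly the alphabetic ones)
def pyStrIsupper (t : List Char) : Bool :=
  t.any PySem.Chars.isalpha && t.all (fun c => !PySem.Chars.islower c)

def weaveop (s : String) : String :=
  let cs := s.toList
  if cs.length ≤ 1 then s
  else
    let n : Int := cs.length
    let ns := (PySem.List.pyRange 0 (n - 1)).foldl (fun ns i =>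
      let ns :=
        if PySem.Chars.isalpha (PySem.List.pyGetD cs i ' ') &&
           PySem.Chars.isalpha (PySem.List.pyGetD cs (i + 1) ' ') then
          let first := [PySem.List.pyGetD cs i ' '] ++
            (if PySem.Chars.isupper (PySem.List.pyGetD cs i ' ') then ['O'] else ['o'])
          let second :=
            (if pyStrIsupper (PySem.List.slice cs (some (i + 1)) (some (i + 2))) then ['P'] else ['p'])
              ++ PySem.List.slice cs (some (i + 1)) (some (i + 1))
          ns ++ (first ++ second)
        else
          ns ++ [PySem.List.pyGetD cs i ' ']
      if i = n - 2 then ns ++ [PySem.List.pyGetD cs (n - 1) ' '] else ns) []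
    String.ofList ns

-- ===== PORT B =====
-- pass 2 helper: weave markers inside one run (fold over the tail, state = (out, prev))
def weaveRun : List Char → List Char
  | [] => []
  | c :: rest =>
    (rest.foldl (fun (st : List Char × Char) ch =>
      (st.1 ++ [if PySem.Chars.isupper st.2 then 'O' else 'o',
                if PySem.Chars.isupper ch then 'P' else 'p', ch], ch)) ([c], c)).1

-- pass 1 step: extend the last run when both its last char and ch are alphabetic
def groupStep (runs : List (List Char)) (ch : Char) : List (List Char) :=
  if PySem.Chars.isalpha ch && !runs.isEmpty &&
     PySem.Chars.isalpha ((runs.getLastD []).getLastD ' ') then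
    runs.dropLast ++ [runs.getLastD [] ++ [ch]]
  else runs ++ [[ch]]

def weaveop_alt (s : String) : String :=
  String.ofList ((s.toList.foldl groupStep []).flatMap weaveRun)

-- ===== PRECONDITION & SPEC =====
def Spec_weaveop (s : String) (out : String) : Prop := out = weaveop_alt s
instance (s : String) (out : String) : Decidable (Spec_weaveop s out) := by unfold Spec_weaveop; infer_instance

-- ===== CLAIM (what is proved, stated in full; the proofs are below) =====
def Claim_equal_weaveop : Prop := ∀ (s : String), Dom_weaveop s → Spec_weaveop s (weaveop s)

-- ===== LEMMAS AND PROOFS =====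

-- the chunk a pair of adjacent characters contributes (pairwise normal form)
def weaveChunk (p : Char × Char) : List Char :=
  [p.1] ++
    (if PySem.Chars.isalpha p.1 && PySem.Chars.isalpha p.2 then
      [if PySem.Chars.isupper p.1 then 'O' else 'o',
       if PySem.Chars.isupper p.2 then 'P' else 'p']
     else [])

lemma isupper_eq_not_islower {c : Char} (h : PySem.Chars.isalpha c = true) :
    PySem.Chars.isupper c = !PySem.Chars.islower c := by
  simp only [PySem.Chars.isalpha, PySem.Chars.isupper, PySem.Chars.islower,
    Bool.or_eq_true, Bool.and_eq_true, decide_eq_true_eq] at *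
  rcases h with ⟨h1, h2⟩ | ⟨h1, h2⟩
  · have hnl : ¬ ('a' ≤ c) := fun hc => absurd (le_trans hc h2) (by decide)
    simp [h1, h2, hnl]
  · have hnu : ¬ (c ≤ 'Z') := fun hc => absurd (le_trans h1 hc) (by decide)
    simp [h1, h2, hnu]

lemma take_one_drop {l : List Char} {j : Nat} (h : j < l.length) :
    (l.drop j).take 1 = [l[j]] := by
  rw [List.drop_eq_getElem_cons h]; rfl

-- A's loop body appends a chunk that only depends on i
lemma weaveop_chunk (cs : List Char) (k : Nat) (hk : k + 1 < cs.length) :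
    ((if PySem.Chars.isalpha (PySem.List.pyGetD cs (k : Int) ' ') &&
         PySem.Chars.isalpha (PySem.List.pyGetD cs ((k : Int) + 1) ' ') then
        ([PySem.List.pyGetD cs (k : Int) ' '] ++
          (if PySem.Chars.isupper (PySem.List.pyGetD cs (k : Int) ' ') then ['O'] else ['o'])) ++
        ((if pyStrIsupper (PySem.List.slice cs (some ((k : Int) + 1)) (some ((k : Int) + 2))) then ['P'] else ['p'])
          ++ PySem.List.slice cs (some ((k : Int) + 1)) (some ((k : Int) + 1)))
      else [PySem.List.pyGetD cs (k : Int) ' ']) : List Char)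
    = weaveChunk (cs[k], cs[k + 1]) := by
  have hk0 : k < cs.length := by omega
  have e1 : PySem.List.pyGetD cs (k : Int) ' ' = cs[k] := by
    rw [PySem.List.pyGetD_eq_getElem cs ' ' (by positivity) (by exact_mod_cast hk0)]
    simp
  have e2 : PySem.List.pyGetD cs ((k : Int) + 1) ' ' = cs[k + 1] := by
    have : ((k : Int) + 1) = ((k + 1 : Nat) : Int) := by push_cast; ring
    rw [this, PySem.List.pyGetD_eq_getElem cs ' ' (by positivity) (by exact_mod_cast hk)]
    simp
  have e3 : PySem.List.slice cs (some ((k : Int) + 1)) (some ((k : Int) + 2)) = [cs[k + 1]] := by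
    have h1 : ((k : Int) + 1) = ((k + 1 : Nat) : Int) := by push_cast; ring
    have h2 : ((k : Int) + 2) = ((k + 2 : Nat) : Int) := by push_cast; ring
    rw [h1, h2, PySem.List.slice_natCast]
    have : k + 2 - (k + 1) = 1 := by omega
    rw [this, take_one_drop hk]
  have e4 : PySem.List.slice cs (some ((k : Int) + 1)) (some ((k : Int) + 1)) = [] := by
    have h1 : ((k : Int) + 1) = ((k + 1 : Nat) : Int) := by push_cast; ring
    rw [h1, PySem.List.slice_natCast]; simp
  rw [e1, e2, e3, e4, weaveChunk]
  by_cases ha : PySem.Chars.isalpha cs[k] = true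
  · by_cases hb : PySem.Chars.isalpha cs[k + 1] = true
    · simp only [ha, hb, Bool.and_self, if_true, pyStrIsupper, List.any_cons, List.any_nil,
        List.all_cons, List.all_nil, Bool.or_false, Bool.and_true,
        isupper_eq_not_islower hb, Bool.true_and, List.append_nil]
      split_ifs <;> rfl
    · simp [ha, hb]
  · simp [ha]

lemma zip_tail_eq_map_range (cs : List Char) :
    cs.zip cs.tail = (List.range (cs.length - 1)).map
      (fun k => (cs.getD k ' ', cs.getD (k + 1) ' ')) := by
  apply List.ext_getElem
  · simp
  · intro i h1 h2
    have hlen : i + 1 < cs.length := by simp at h1; omega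
    have hi : i < cs.length := by omega
    simp [List.getElem_zip, List.getElem_tail, List.getD,
      List.getElem?_eq_getElem hi, List.getElem?_eq_getElem hlen]

lemma getLastD_eq_getLast {α : Type} (l : List α) (h : l ≠ []) (d : α) :
    l.getLastD d = l.getLast h := by
  rw [List.getLastD_eq_getLast?, List.getLast?_eq_some_getLast h]
  rfl

-- the pairwise normal form of the woven string
def pairForm (cs : List Char) : List Char :=
  ((cs.zip cs.tail).map weaveChunk).flatten ++ [cs.getLastD ' ']

-- A's loop computes the pairwise normal form (strings of length ≥ 2)
lemma weaveop_main (cs : List Char) (h2 : 2 ≤ cs.length) (hne : cs ≠ []) :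
    ((PySem.List.pyRange 0 ((cs.length : Int) - 1)).foldl (fun ns i =>
      let ns :=
        if PySem.Chars.isalpha (PySem.List.pyGetD cs i ' ') &&
           PySem.Chars.isalpha (PySem.List.pyGetD cs (i + 1) ' ') then
          let first := [PySem.List.pyGetD cs i ' '] ++
            (if PySem.Chars.isupper (PySem.List.pyGetD cs i ' ') then ['O'] else ['o'])
          let second :=
            (if pyStrIsupper (PySem.List.slice cs (some (i + 1)) (some (i + 2))) then ['P'] else ['p'])
              ++ PySem.List.slice cs (some (i + 1)) (some (i + 1))
          ns ++ (first ++ second)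
        else
          ns ++ [PySem.List.pyGetD cs i ' ']
      if i = (cs.length : Int) - 2 then ns ++ [PySem.List.pyGetD cs ((cs.length : Int) - 1) ' '] else ns) [])
    = pairForm cs := by
  set n := cs.length with hn
  set g : Int → List Char := fun i =>
    (if PySem.Chars.isalpha (PySem.List.pyGetD cs i ' ') &&
        PySem.Chars.isalpha (PySem.List.pyGetD cs (i + 1) ' ') then
       ([PySem.List.pyGetD cs i ' '] ++
         (if PySem.Chars.isupper (PySem.List.pyGetD cs i ' ') then ['O'] else ['o'])) ++
       ((if pyStrIsupper (PySem.List.slice cs (some (i + 1)) (some (i + 2))) then ['P'] else ['p'])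
         ++ PySem.List.slice cs (some (i + 1)) (some (i + 1)))
     else [PySem.List.pyGetD cs i ' ']) ++
    (if i = (n : Int) - 2 then [PySem.List.pyGetD cs ((n : Int) - 1) ' '] else []) with hg
  have hstep : ∀ (acc : List Char), ∀ i ∈ PySem.List.pyRange 0 ((n : Int) - 1),
      (fun ns i =>
        let ns :=
          if PySem.Chars.isalpha (PySem.List.pyGetD cs i ' ') &&
             PySem.Chars.isalpha (PySem.List.pyGetD cs (i + 1) ' ') then
            let first := [PySem.List.pyGetD cs i ' '] ++
              (if PySem.Chars.isupper (PySem.List.pyGetD cs i ' ') then ['O'] else ['o'])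
            let second :=
              (if pyStrIsupper (PySem.List.slice cs (some (i + 1)) (some (i + 2))) then ['P'] else ['p'])
                ++ PySem.List.slice cs (some (i + 1)) (some (i + 1))
            ns ++ (first ++ second)
          else
            ns ++ [PySem.List.pyGetD cs i ' ']
        if i = (n : Int) - 2 then ns ++ [PySem.List.pyGetD cs ((n : Int) - 1) ' '] else ns) acc i
      = acc ++ g i := by
    intro acc i _
    simp only [hg]
    split_ifs <;> simp [List.append_assoc]
  rw [PySem.List.foldl_congr_mem _ _ _ _ hstep, PySem.List.foldl_append_eq_flatMap]
  have hcast : ((n : Int) - 1) = ((n - 1 : Nat) : Int) := by omega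
  rw [hcast, PySem.List.pyRange_zero_natCast, List.flatMap_map]
  have hgk : ∀ k ∈ List.range (n - 1),
      g (k : Int) = weaveChunk (cs.getD k ' ', cs.getD (k + 1) ' ') ++
        (if k = n - 2 then [cs.getLast hne] else []) := by
    intro k hk
    have hk' : k < n - 1 := List.mem_range.mp hk
    have hk1 : k + 1 < cs.length := by omega
    simp only [hg]
    rw [weaveop_chunk cs k hk1]
    congr 1
    · rw [List.getD_eq_getElem _ _ (by omega : k < cs.length), List.getD_eq_getElem _ _ hk1]
    · have hiff : ((k : Int) = (n : Int) - 2) ↔ (k = n - 2) := by omega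
      by_cases hcase : k = n - 2
      · have elast : PySem.List.pyGetD cs ((n : Int) - 1) ' ' = cs.getLast hne := by
          have h1 : ((n : Int) - 1) = ((n - 1 : Nat) : Int) := by omega
          rw [h1, PySem.List.pyGetD_eq_getElem cs ' ' (by positivity)
            (by exact_mod_cast (by omega : n - 1 < cs.length))]
          rw [List.getLast_eq_getElem hne]
          simp
          rfl
        rw [if_pos (hiff.mpr hcase), if_pos hcase, elast]
      · rw [if_neg (fun h => hcase (hiff.mp h)), if_neg hcase]
  rw [List.flatMap_congr hgk]
  have hsplit : n - 1 = (n - 2) + 1 := by omega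
  rw [hsplit, List.range_succ, List.flatMap_append]
  have hbody : ∀ k ∈ List.range (n - 2),
      (weaveChunk (cs.getD k ' ', cs.getD (k + 1) ' ') ++
        (if k = n - 2 then [cs.getLast hne] else []))
      = weaveChunk (cs.getD k ' ', cs.getD (k + 1) ' ') := by
    intro k hk
    have : k < n - 2 := List.mem_range.mp hk
    simp [Nat.ne_of_lt this]
  rw [List.flatMap_congr hbody]
  rw [pairForm, zip_tail_eq_map_range cs, List.flatMap_def, List.map_map]
  rw [hsplit, List.range_succ, List.map_append]
  simp [List.flatMap_def, Function.comp_def, List.append_assoc]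
  rw [List.getLast?_eq_some_getLast hne]
  rfl

-- the second component of weaveRun's fold is the last character of the run
lemma weaveRun_fold_snd (rest : List Char) : ∀ (out : List Char) (c : Char),
    (rest.foldl (fun (st : List Char × Char) ch =>
      (st.1 ++ [if PySem.Chars.isupper st.2 then 'O' else 'o',
                if PySem.Chars.isupper ch then 'P' else 'p', ch], ch)) (out, c)).2
    = (c :: rest).getLastD ' ' := by
  induction rest with
  | nil => intro out c; simp
  | cons d t ih =>
    intro out c
    simp only [List.foldl_cons]
    rw [ih]
    simp

-- appending one character to a nonempty run extends the woven run by its marker pair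
lemma weaveRun_snoc (r : List Char) (hne : r ≠ []) (ch : Char) :
    weaveRun (r ++ [ch]) = weaveRun r ++
      [if PySem.Chars.isupper (r.getLastD ' ') then 'O' else 'o',
       if PySem.Chars.isupper ch then 'P' else 'p', ch] := by
  cases r with
  | nil => exact absurd rfl hne
  | cons c rest =>
    simp only [weaveRun, List.cons_append, List.foldl_append, List.foldl_cons, List.foldl_nil]
    rw [weaveRun_fold_snd]

lemma getLastD_ne_nil {α : Type} {l : List α} {d a : α} (h : l.getLastD d = a) (hd : d ≠ a)
    : l ≠ [] := by
  intro he; subst he; exact hd h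

-- zip-with-tail after a snoc
lemma zip_tail_snoc (cs : List Char) (hne : cs ≠ []) (ch : Char) :
    (cs ++ [ch]).zip (cs ++ [ch]).tail = cs.zip cs.tail ++ [(cs.getLastD ' ', ch)] := by
  induction cs with
  | nil => exact absurd rfl hne
  | cons c rest ih =>
    cases rest with
    | nil => simp
    | cons d t =>
      have := ih (by simp)
      simp only [List.cons_append, List.tail_cons] at this ⊢
      simp only [List.zip_cons_cons] at this ⊢
      rw [this]
      simp

-- the grouping invariant: the last run is nonempty, ends with the string's last
-- character, and weaving the runs yields the pairwise normal form
lemma grouping_inv (cs : List Char) (hne : cs ≠ []) :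
    (cs.foldl groupStep []).getLastD [] ≠ [] ∧
    ((cs.foldl groupStep []).getLastD []).getLastD ' ' = cs.getLastD ' ' ∧
    (cs.foldl groupStep []).flatMap weaveRun = pairForm cs := by
  induction cs using List.reverseRecOn with
  | nil => exact absurd rfl hne
  | append_singleton cs ch ih =>
    rw [List.foldl_append, List.foldl_cons, List.foldl_nil]
    by_cases hcs : cs = []
    · subst hcs
      simp only [List.foldl_nil]
      rw [show groupStep [] ch = [[ch]] from by unfold groupStep; simp]
      refine ⟨by simp, by rfl, ?_⟩
      simp [weaveRun, pairForm]
    · obtain ⟨h1, h2, h3⟩ := ih hcs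
      set R := cs.foldl groupStep [] with hR
      have hRne : R ≠ [] := getLastD_ne_nil (a := R.getLastD []) rfl (fun he => h1 he.symm)
      have hRsplit : R.dropLast ++ [R.getLastD []] = R := by
        rw [getLastD_eq_getLast R hRne]
        exact List.dropLast_append_getLast hRne
      have hRe : R.isEmpty = false := by
        simp [List.isEmpty_iff, hRne]
      unfold groupStep
      by_cases hcond : (PySem.Chars.isalpha ch && !R.isEmpty &&
          PySem.Chars.isalpha ((R.getLastD []).getLastD ' ')) = true
      · rw [if_pos hcond]
        have halpha_ch : PySem.Chars.isalpha ch = true := by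
          simp only [Bool.and_eq_true] at hcond; exact hcond.1.1
        have halpha_last : PySem.Chars.isalpha (cs.getLastD ' ') = true := by
          simp only [Bool.and_eq_true] at hcond; rw [← h2]; exact hcond.2
        refine ⟨by simp [List.getLastD_concat], by simp [List.getLastD_concat], ?_⟩
        have hsplit3 : R.flatMap weaveRun = R.dropLast.flatMap weaveRun ++ weaveRun (R.getLastD []) := by
          conv_lhs => rw [← hRsplit]
          simp [List.flatMap_append]
        rw [List.flatMap_append]
        simp only [List.flatMap_cons, List.flatMap_nil, List.append_nil]
        rw [weaveRun_snoc _ h1, h2]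
        rw [← List.append_assoc, ← hsplit3, h3]
        rw [pairForm, pairForm, zip_tail_snoc cs hcs ch]
        simp only [List.map_append, List.flatten_append, List.map_cons, List.map_nil,
          List.flatten_cons, List.flatten_nil, List.append_nil]
        rw [weaveChunk]
        simp only [halpha_ch, halpha_last, Bool.and_self, if_true]
        simp [List.getLastD_concat]
      · rw [if_neg hcond]
        refine ⟨by simp [List.getLastD_concat], by simp [List.getLastD_concat], ?_⟩
        rw [List.flatMap_append, h3]
        simp only [List.flatMap_cons, List.flatMap_nil, List.append_nil, weaveRun,
          List.foldl_nil]
        rw [pairForm, pairForm, zip_tail_snoc cs hcs ch]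
        simp only [List.map_append, List.flatten_append, List.map_cons, List.map_nil,
          List.flatten_cons, List.flatten_nil, List.append_nil]
        rw [weaveChunk]
        have hnot : (PySem.Chars.isalpha (cs.getLastD ' ') && PySem.Chars.isalpha ch) = false := by
          have hni : ¬ (PySem.Chars.isalpha ch = true ∧
              PySem.Chars.isalpha (cs.getLastD ' ') = true) := by
            rintro ⟨ha, hb⟩
            have hb' := hb
            rw [List.getLastD_eq_getLast?] at hb'
            exact hcond (by rw [h2]; simp [ha, hb', hRe])
          cases hA : PySem.Chars.isalpha (cs.getLastD ' ') <;>
            cases hB : PySem.Chars.isalpha ch <;> simp_all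
        simp only [hnot]
        simp

-- ===== VERDICT (by name: the statement is the Claim_ definition above) =====
theorem weaveop_spec : Claim_equal_weaveop := by
  intro s _
  unfold Spec_weaveop weaveop weaveop_alt
  cases hcs : s.toList with
  | nil =>
    have hs := congrArg String.ofList hcs
    rw [String.ofList_toList] at hs
    simp only [List.length_nil, List.foldl_nil, List.flatMap_nil]
    norm_num
    exact hs
  | cons c rest =>
    have hs := congrArg String.ofList hcs
    rw [String.ofList_toList] at hs
    cases rest with
    | nil =>
      simp only [List.length_cons, List.length_nil]
      norm_num
      simp only [List.foldl_cons, List.foldl_nil, groupStep, List.isEmpty_nil,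
        Bool.not_true, Bool.and_false, Bool.false_and]
      rw [if_neg (by simp)]
      simp only [List.nil_append, List.flatMap_cons, List.flatMap_nil, List.append_nil,
        weaveRun, List.foldl_nil]
      exact hs
    | cons d rest' =>
      have h2 : 2 ≤ (c :: d :: rest').length := by simp
      have hlen : ¬ (c :: d :: rest').length ≤ 1 := by simp
      simp only [hlen, if_false]
      rw [weaveop_main (c :: d :: rest') h2 (by simp)]
      rw [(grouping_inv (c :: d :: rest') (by simp)).2.2]
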